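-- pv_equiv track=rewrite | github.com/ElMooro/si | aws/ops/pending/176_verify_screener_or_async_rerun.py | coverage_stats
-- ===== SOURCE A (Python) =====
-- def coverage_stats(stocks):
--     sma50 = sum(1 for s in stocks if s.get("sma50") is not None)
--     sma200 = sum(1 for s in stocks if s.get("sma200") is not None)
--     name = sum(1 for s in stocks if s.get("name"))
--     pe = sum(1 for s in stocks if s.get("peRatio") is not None)
--     golden = sum(1 for s in stocks if s.get("crossSignal") == "GOLDEN")
--     death = sum(1 for s in stocks if s.get("crossSignal") == "DEATH")
--     return dict(
--         n=len(stocks),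
--         sma50=sma50, sma200=sma200, name=name, pe=pe,
--         golden=golden, death=death,
--     )
-- ===== SOURCE B (Python) =====
-- def coverage_stats(stocks):
--     sma50 = sma200 = name = pe = golden = death = 0
--     for s in stocks:
--         if s.get("sma50") is not None:
--             sma50 += 1
--         if s.get("sma200") is not None:
--             sma200 += 1
--         if s.get("name"):
--             name += 1
--         if s.get("peRatio") is not None:
--             pe += 1
--         cs = s.get("crossSignal")
--         if cs == "GOLDEN":
--             golden += 1
--         elif cs == "DEATH":
--             death += 1
--     return {"n": len(stocks), "sma50": sma50, "sma200": sma200,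
--             "name": name, "pe": pe, "golden": golden, "death": death}
-- ===== Notes on version B (the rewrite author's own statement) =====
-- stated objective: simpler
-- what changed: Replaces six independent generator-sum scans over the list with one explicit loop that maintains all six counters in a single traversal (golden/death fused into an if/elif on the same lookup).
import Mathlib
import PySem

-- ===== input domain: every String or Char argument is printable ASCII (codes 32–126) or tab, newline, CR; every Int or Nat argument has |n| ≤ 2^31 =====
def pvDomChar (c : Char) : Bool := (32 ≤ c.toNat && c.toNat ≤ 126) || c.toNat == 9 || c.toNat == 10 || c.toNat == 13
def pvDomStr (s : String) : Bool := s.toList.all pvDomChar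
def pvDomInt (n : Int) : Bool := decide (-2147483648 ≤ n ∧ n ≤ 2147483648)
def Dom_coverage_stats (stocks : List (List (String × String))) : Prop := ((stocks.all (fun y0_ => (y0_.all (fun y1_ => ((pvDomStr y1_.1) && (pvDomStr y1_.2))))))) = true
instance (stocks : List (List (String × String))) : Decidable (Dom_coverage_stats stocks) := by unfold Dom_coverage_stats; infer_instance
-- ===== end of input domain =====

-- B replaces A's six independent scans of the list with one loop maintaining six counters (simpler / one pass).

-- ===== PORT A =====
-- s.get(k) on a stock dict (association list → Python dict, last value wins on duplicate keys)
def dget (s : List (String × String)) (k : String) : Option String :=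
  (PySem.Dict.ofList s).get? k

def coverage_stats (stocks : List (List (String × String))) : List (String × Int) :=
  let sma50 := stocks.foldl (fun a s => if (dget s "sma50").isSome then a + 1 else a) (0 : Int)
  let sma200 := stocks.foldl (fun a s => if (dget s "sma200").isSome then a + 1 else a) (0 : Int)
  -- truthiness of s.get("name"): present with a non-empty value
  let name := stocks.foldl (fun a s => if (dget s "name").getD "" ≠ "" then a + 1 else a) (0 : Int)
  let pe := stocks.foldl (fun a s => if (dget s "peRatio").isSome then a + 1 else a) (0 : Int)
  let golden := stocks.foldl (fun a s => if dget s "crossSignal" = some "GOLDEN" then a + 1 else a) (0 : Int)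
  let death := stocks.foldl (fun a s => if dget s "crossSignal" = some "DEATH" then a + 1 else a) (0 : Int)
  [("n", (stocks.length : Int)), ("sma50", sma50), ("sma200", sma200), ("name", name),
   ("pe", pe), ("golden", golden), ("death", death)]

-- ===== PORT B =====
def stepB (acc : Int × Int × Int × Int × Int × Int) (s : List (String × String)) :
    Int × Int × Int × Int × Int × Int :=
  let (c50, c200, cname, cpe, cg, cd) := acc
  let c50 := if (dget s "sma50").isSome then c50 + 1 else c50
  let c200 := if (dget s "sma200").isSome then c200 + 1 else c200
  let cname := if (dget s "name").getD "" ≠ "" then cname + 1 else cname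
  let cpe := if (dget s "peRatio").isSome then cpe + 1 else cpe
  let cs := dget s "crossSignal"
  let (cg, cd) := if cs = some "GOLDEN" then (cg + 1, cd)
                  else if cs = some "DEATH" then (cg, cd + 1) else (cg, cd)
  (c50, c200, cname, cpe, cg, cd)

def coverage_stats_alt (stocks : List (List (String × String))) : List (String × Int) :=
  let r := stocks.foldl stepB (0, 0, 0, 0, 0, 0)
  [("n", (stocks.length : Int)), ("sma50", r.1), ("sma200", r.2.1), ("name", r.2.2.1),
   ("pe", r.2.2.2.1), ("golden", r.2.2.2.2.1), ("death", r.2.2.2.2.2)]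

-- ===== PRECONDITION & SPEC =====
def Spec_coverage_stats (stocks : List (List (String × String))) (out : List (String × Int)) : Prop := out = coverage_stats_alt stocks
instance (stocks : List (List (String × String))) (out : List (String × Int)) : Decidable (Spec_coverage_stats stocks out) := by unfold Spec_coverage_stats; infer_instance

-- ===== CLAIM (what is proved, stated in full; the proofs are below) =====
def Claim_equal_coverage_stats : Prop := ∀ (stocks : List (List (String × String))), Dom_coverage_stats stocks → Spec_coverage_stats stocks (coverage_stats stocks)

-- ===== LEMMAS AND PROOFS =====
-- the fused fold computes the six independent folds, for any starting accumulators
theorem foldl_stepB (stocks : List (List (String × String)))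
    (a b c d e f : Int) :
    stocks.foldl stepB (a, b, c, d, e, f) =
      (stocks.foldl (fun a s => if (dget s "sma50").isSome then a + 1 else a) a,
       stocks.foldl (fun a s => if (dget s "sma200").isSome then a + 1 else a) b,
       stocks.foldl (fun a s => if (dget s "name").getD "" ≠ "" then a + 1 else a) c,
       stocks.foldl (fun a s => if (dget s "peRatio").isSome then a + 1 else a) d,
       stocks.foldl (fun a s => if dget s "crossSignal" = some "GOLDEN" then a + 1 else a) e,
       stocks.foldl (fun a s => if dget s "crossSignal" = some "DEATH" then a + 1 else a) f) := by
  induction stocks generalizing a b c d e f with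
  | nil => rfl
  | cons s t ih =>
    simp only [List.foldl_cons]
    rw [show stepB (a, b, c, d, e, f) s =
        ((if (dget s "sma50").isSome then a + 1 else a),
         (if (dget s "sma200").isSome then b + 1 else b),
         (if (dget s "name").getD "" ≠ "" then c + 1 else c),
         (if (dget s "peRatio").isSome then d + 1 else d),
         (if dget s "crossSignal" = some "GOLDEN" then e + 1 else e),
         (if dget s "crossSignal" = some "DEATH" then f + 1 else f)) from ?_, ih]
    unfold stepB
    rcases h : dget s "crossSignal" with _ | v
    · simp
    · by_cases hg : v = "GOLDEN"
      · subst hg; simp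
      · by_cases hd : v = "DEATH" <;> simp [hg, hd]

-- ===== VERDICT (by name: the statement is the Claim_ definition above) =====
theorem coverage_stats_spec : Claim_equal_coverage_stats := by
  intro stocks _
  unfold Spec_coverage_stats coverage_stats coverage_stats_alt
  rw [foldl_stepB]
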